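-- pv_equiv track=rewrite | github.com/nathanbangwa243/skimindtools | adherence.py | findOwnerOfData
-- ===== SOURCE A (Python) =====
-- def findOwnerOfData(commonData, metadata):
--     """
--     theorem : une donnee partagee entre n ensembles ne peut appartenir qu'a un seul
--                 de ces n ensembles suivant la frequence d'apparition de la donnee dans les n ensembles
--                 si la donnee a une meme frequence dans au moins deux des ensembles, elle est dite non partageable
--                 et est exclue -> elle n'appartient a aucun de ces ensembles
--
--     la fonction cherche un ensemble (element key) auquel appartient une donnee
--
--     :param metadata: {
--                         set1: [data],
--                         set2: [data],
--                         set3: [data]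
--                     } # or
--
--                     [set1, set2, set3, ..., setn] or (set1, set2, set3, ..., setn) # with type(setx) in [list, tuple]
--
--     :return: type -> function of metadata.keys()
--             response in metadata.keys() or None if the commonData has not an owner
--     """
--     response =  None # by deaault : la donnee n'appartient a aucun des ensembles
--
--     if type(metadata) != dict:  # si on a pas un dictionnaire a l'entree
--         metadata = dict(enumerate(metadata)) # on transforme la list(tuple) en dictionnaire
--                                                 # {index: value}
--
--     # liste des cles(sets) partageants la donnee
--     setListKey = [setKey for setKey, dataList in metadata.items() if commonData in dataList]
--
--     if setListKey: # si la donnee est presente dans au moins l'un des ensembles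
--         if len(setListKey) == 1: # si la donnee n'appartient qu'a un seul ensemble
--             return setListKey[0]    # on renvoit l'id de l'ensemble proprietaire
--
--         else:   # si la donnee est partagee entre au moins 2 ensembles
--             # liste des frequences d'apparition de la donnee dans les ensembles cibles
--             commonDataFrequency = [list(metadata[setKey]).count(commonData) for setKey in setListKey]
--
--             # la copie de la liste des frequences
--             copyList = list(commonDataFrequency)
--             copyList.sort() # tri croissant
--
--             if copyList[-1] > copyList[-2]: # si la plus grande frequence est strictement superieur aux autres
--                 indexOfFrequency = commonDataFrequency.index(copyList[-1])  # on recupere l'indice de la frequence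
--
--                 return setListKey[indexOfFrequency] # on renvoi l'id de l'ensemble
--
--
--     return response
-- ===== SOURCE B (Python) =====
-- def findOwnerOfData(commonData, metadata):
--     if type(metadata) != dict:
--         metadata = dict(enumerate(metadata))
--     best_key, best_count, tie = None, -1, False
--     for set_key, data_list in metadata.items():
--         c = list(data_list).count(commonData)
--         if c == 0:
--             continue
--         if c > best_count:
--             best_key, best_count, tie = set_key, c, False
--         elif c == best_count:
--             tie = True
--     if best_count < 0 or tie:
--         return None
--     return best_key
-- ===== Notes on version B (the rewrite author's own statement) =====
-- stated objective: simpler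
-- what changed: Replaces A's filter-then-count-then-sort-then-index pipeline (four passes plus a sort over the matching sets) with a single pass over metadata.items() maintaining the best key, best count and a tie flag; Pre_ only requires distinct keys, which every Python dict has by construction.
import Mathlib
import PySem

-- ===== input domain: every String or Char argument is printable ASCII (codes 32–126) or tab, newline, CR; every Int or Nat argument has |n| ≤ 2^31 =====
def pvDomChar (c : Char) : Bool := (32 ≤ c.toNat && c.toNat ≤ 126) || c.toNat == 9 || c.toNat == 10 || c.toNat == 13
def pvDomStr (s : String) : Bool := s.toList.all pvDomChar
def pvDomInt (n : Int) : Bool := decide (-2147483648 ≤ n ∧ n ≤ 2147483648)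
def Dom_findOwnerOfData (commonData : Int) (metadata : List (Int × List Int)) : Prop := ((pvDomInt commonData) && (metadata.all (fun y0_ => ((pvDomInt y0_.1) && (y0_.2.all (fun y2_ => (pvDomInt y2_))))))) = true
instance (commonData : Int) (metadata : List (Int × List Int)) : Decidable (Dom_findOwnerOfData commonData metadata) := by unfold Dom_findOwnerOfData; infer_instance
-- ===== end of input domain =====

-- B replaces A's filter/count/sort/index pipeline by a single pass keeping best key, best count and a tie flag (simpler, no sort).


-- ===== PORT A =====
def findOwnerOfData (commonData : Int) (metadata : List (Int × List Int)) : Option Int :=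
  -- response = None
  let response : Option Int := none
  -- setListKey = [setKey for setKey, dataList in metadata.items() if commonData in dataList]
  let setListKey : List Int := (metadata.filter (fun p => decide (commonData ∈ p.2))).map Prod.fst
  if setListKey ≠ [] then
    if setListKey.length = 1 then
      PySem.List.pyGet? setListKey 0              -- return setListKey[0]
    else
      -- commonDataFrequency = [list(metadata[setKey]).count(commonData) for setKey in setListKey]
      let commonDataFrequency : List Int :=
        setListKey.map (fun k => (PySem.List.count ((PySem.Dict.mk metadata).getD k []) commonData : Int))
      -- copyList = list(commonDataFrequency); copyList.sort()
      let copyList := PySem.List.sorted commonDataFrequency (fun x => x) false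
      match PySem.List.pyGet? copyList (-1), PySem.List.pyGet? copyList (-2) with
      | some a, some b =>
        if a > b then
          match PySem.List.index? commonDataFrequency a with
          | some i => PySem.List.pyGet? setListKey (i : Int)   -- return setListKey[indexOfFrequency]
          | none => response
        else response
      | _, _ => response
  else
    response

-- ===== PORT B =====
def findOwnerOfData_alt (commonData : Int) (metadata : List (Int × List Int)) : Option Int :=
  let st : Option Int × Int × Bool :=
    metadata.foldl (fun st p =>
      let c : Int := (PySem.List.count p.2 commonData : Int)
      if c = 0 then st
      else if c > st.2.1 then (some p.1, c, false)
      else if c = st.2.1 then (st.1, st.2.1, true)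
      else st)
    (none, -1, false)
  if st.2.1 < 0 ∨ st.2.2 then none else st.1

-- ===== PRECONDITION & SPEC =====
-- Pre_ requires distinct keys: the association list encodes a Python dict, whose keys are
-- always distinct, so no Python input is excluded.
def Pre_findOwnerOfData (commonData : Int) (metadata : List (Int × List Int)) : Prop :=
  (metadata.map Prod.fst).Nodup
instance (commonData : Int) (metadata : List (Int × List Int)) : Decidable (Pre_findOwnerOfData commonData metadata) := by unfold Pre_findOwnerOfData; infer_instance

def pvWitness_findOwnerOfData : Int × (List (Int × List Int)) := (5, [(1, [5, 5]), (2, [5]), (3, [4])])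

def Spec_findOwnerOfData (commonData : Int) (metadata : List (Int × List Int)) (out : Option Int) : Prop := out = findOwnerOfData_alt commonData metadata
instance (commonData : Int) (metadata : List (Int × List Int)) (out : Option Int) : Decidable (Spec_findOwnerOfData commonData metadata out) := by unfold Spec_findOwnerOfData; infer_instance

-- ===== CLAIM (what is proved, stated in full; the proofs are below) =====
def Claim_equal_findOwnerOfData : Prop := ∀ (commonData : Int) (metadata : List (Int × List Int)), Dom_findOwnerOfData commonData metadata → Pre_findOwnerOfData commonData metadata → Spec_findOwnerOfData commonData metadata (findOwnerOfData commonData metadata)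

-- ===== LEMMAS AND PROOFS =====

-- helper names for the proofs (used only below the claim block)
def pvStep (st : Option Int × Int × Bool) (q : Int × Int) : Option Int × Int × Bool :=
  if q.2 > st.2.1 then (some q.1, q.2, false)
  else if q.2 = st.2.1 then (st.1, st.2.1, true)
  else st

def pvPairs (cd : Int) (md : List (Int × List Int)) : List (Int × Int) :=
  (md.filter (fun p => decide (cd ∈ p.2))).map (fun p => (p.1, (p.2.count cd : Int)))

lemma pv_alt_eq (cd : Int) (md : List (Int × List Int)) :
    findOwnerOfData_alt cd md =
      (let st := (pvPairs cd md).foldl pvStep (none, -1, false);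
       if st.2.1 < 0 ∨ st.2.2 then none else st.1) := by
  unfold findOwnerOfData_alt pvPairs
  rw [List.foldl_map, List.foldl_filter]
  have hfun : ∀ (st : Option Int × Int × Bool) (p : Int × List Int),
      (let c : Int := (PySem.List.count p.2 cd : Int);
       if c = 0 then st
       else if c > st.2.1 then (some p.1, c, false)
       else if c = st.2.1 then (st.1, st.2.1, true)
       else st)
      = if decide (cd ∈ p.2) = true then pvStep st (p.1, (p.2.count cd : Int)) else st := by
    intro st p
    by_cases hm : cd ∈ p.2
    · have hc : p.2.count cd ≠ 0 := by
        simpa [List.count_eq_zero] using hm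
      simp [pvStep, hm, PySem.List.count, hc]
      split_ifs <;> rfl
    · have hc : p.2.count cd = 0 := by simpa [List.count_eq_zero] using hm
      simp [hm, PySem.List.count, hc]
  simp only [hfun]

lemma pvBest_spec (qs : List (Int × Int)) (h1 : ∀ q ∈ qs, 1 ≤ q.2) :
    (qs.foldl pvStep (none, -1, false) = (none, -1, false) ∧ qs = []) ∨
    ∃ k m, 1 ≤ m ∧
      qs.foldl pvStep (none, -1, false) = (some k, m, decide (2 ≤ (qs.map Prod.snd).count m)) ∧
      (∀ q ∈ qs, q.2 ≤ m) ∧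
      qs.find? (fun q => q.2 == m) = some (k, m) := by
  induction qs using List.reverseRecOn with
  | nil => exact Or.inl ⟨rfl, rfl⟩
  | append_singleton qs q ih =>
    have hq : 1 ≤ q.2 := h1 q (by simp)
    rw [List.foldl_append]
    rcases ih (fun x hx => h1 x (by simp [hx])) with ⟨h0, rfl⟩ | ⟨k, m, hm1, hfold, hmax, hfind⟩
    · right
      refine ⟨q.1, q.2, hq, ?_, ?_, ?_⟩
      · rw [h0]
        have : q.2 > -1 := by omega
        simp [pvStep, this]
      · simp
      · simp
    · right
      rw [hfold]
      rcases lt_trichotomy q.2 m with hlt | heq | hgt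
      · -- q.2 < m : state unchanged
        refine ⟨k, m, hm1, ?_, ?_, ?_⟩
        · have h1' : ¬ q.2 > m := by omega
          have h2' : ¬ q.2 = m := by omega
          simp [pvStep, h1', List.count_append, h2']
        · intro x hx; rcases List.mem_append.mp hx with h | h
          · exact hmax x h
          · simp at h; subst h; omega
        · rw [List.find?_append, hfind]; rfl
      · -- q.2 = m : tie
        have hmem : (k, m) ∈ qs := List.mem_of_find?_eq_some hfind
        have hcnt : 1 ≤ (qs.map Prod.snd).count m := by
          refine List.count_pos_iff.mpr ?_
          exact List.mem_map.mpr ⟨(k, m), hmem, rfl⟩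
        refine ⟨k, m, hm1, ?_, ?_, ?_⟩
        · have h1' : ¬ q.2 > m := by omega
          simp [pvStep, heq, List.count_append]
          exact ⟨k, hmem⟩
        · intro x hx; rcases List.mem_append.mp hx with h | h
          · exact hmax x h
          · simp at h; subst h; omega
        · rw [List.find?_append, hfind]; rfl
      · -- q.2 > m : new strict max
        refine ⟨q.1, q.2, hq, ?_, ?_, ?_⟩
        · have hnot : q.2 ∉ qs.map Prod.snd := by
            intro hmem
            rcases List.mem_map.mp hmem with ⟨x, hx, hx2⟩
            have := hmax x hx; omega
          have hz : (qs.map Prod.snd).count q.2 = 0 := List.count_eq_zero.mpr hnot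
          simp [pvStep, hgt, List.count_append, hz]
        · intro x hx; rcases List.mem_append.mp hx with h | h
          · have := hmax x h; omega
          · simp at h; subst h; omega
        · have hnone : qs.find? (fun q' => q'.2 == q.2) = none := by
            refine List.find?_eq_none.mpr ?_
            intro x hx
            have := hmax x hx
            simp; omega
          rw [List.find?_append, hnone]
          simp

theorem pv_main (cd : Int) (md : List (Int × List Int)) (hnd : (md.map Prod.fst).Nodup) :
    findOwnerOfData cd md = findOwnerOfData_alt cd md := by
  rw [pv_alt_eq]
  have h1 : ∀ q ∈ pvPairs cd md, 1 ≤ q.2 := by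
    intro q hq
    rcases List.mem_map.mp hq with ⟨p, hp, rfl⟩
    have hmem : cd ∈ p.2 := by simpa using (List.mem_filter.mp hp).2
    have : 0 < p.2.count cd := List.count_pos_iff.mpr hmem
    simp; omega
  have hkeys : (md.filter (fun p => decide (cd ∈ p.2))).map Prod.fst = (pvPairs cd md).map Prod.fst := by
    unfold pvPairs; rw [List.map_map]; rfl
  have hfreq : (((md.filter (fun p => decide (cd ∈ p.2))).map Prod.fst).map
      (fun k => (PySem.List.count ((PySem.Dict.mk md).getD k []) cd : Int))) = (pvPairs cd md).map Prod.snd := by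
    unfold pvPairs
    rw [List.map_map, List.map_map]
    apply List.map_congr_left
    intro p hp
    have hpmem : p ∈ md := (List.mem_filter.mp hp).1
    have hit : (p.1, p.2) ∈ (PySem.Dict.mk md).items := by simpa using hpmem
    have hk : (PySem.Dict.mk md).keys.Nodup := by simpa [PySem.Dict.keys] using hnd
    have hgd := PySem.Dict.getD_of_mem_items (PySem.Dict.mk md) hit hk
    simp [Function.comp, hgd, PySem.List.count]
  rcases pvBest_spec (pvPairs cd md) h1 with ⟨hfold, hqsnil⟩ | ⟨k, m, hm1, hfold, hmax, hfind⟩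
  · have hM : md.filter (fun p => decide (cd ∈ p.2)) = [] := by
      unfold pvPairs at hqsnil; exact List.map_eq_nil_iff.mp hqsnil
    unfold findOwnerOfData
    simp [hM, hfold]
  · have hne : pvPairs cd md ≠ [] := by
      intro h; rw [h] at hfind; simp at hfind
    by_cases hone : (pvPairs cd md).length = 1
    · -- exactly one matching set
      rcases hq1 : pvPairs cd md with _ | ⟨q0, qs'⟩
      · exact absurd hq1 hne
      · have hqs' : qs' = [] := by
          rw [hq1] at hone; simpa using hone
        subst hqs'
        rw [hq1] at hfind hfold
        have hq0 : q0 = (k, m) := by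
          by_cases h : q0.2 == m
          · simpa [List.find?, h] using hfind
          · simp [List.find?, h] at hfind
        subst hq0
        unfold findOwnerOfData
        simp only [hkeys, hq1]
        simp [hfold, PySem.List.pyGet?]
        rw [if_neg (by omega : ¬ m < 0)]
        simp [PySem.List.pyIdx?]
    · have hlen2 : 2 ≤ (pvPairs cd md).length := by
        have h0 : (pvPairs cd md).length ≠ 0 := fun h => hne (List.length_eq_zero_iff.mp h)
        omega
      set qs := pvPairs cd md with hqsdef
      set cs : List Int := qs.map Prod.snd with hcsdef
      set s := PySem.List.sorted cs (fun x => x) false with hsdef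
      have hslen : s.length = qs.length := by
        rw [hsdef, PySem.List.length_sorted, hcsdef, List.length_map]
      have hn2 : 2 ≤ s.length := by omega
      have hperm : s.Perm cs := by rw [hsdef]; exact PySem.List.sorted_perm cs _ false
      have ha : PySem.List.pyGet? s (-1) = some (s[s.length - 1]'(by omega)) := by
        rw [PySem.List.pyGet?_neg_ofNat s 1 (by omega) (by omega)]
        rw [List.getElem?_eq_getElem (by omega)]
      have hb : PySem.List.pyGet? s (-2) = some (s[s.length - 2]'(by omega)) := by
        rw [PySem.List.pyGet?_neg_ofNat s 2 (by omega) (by omega)]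
        rw [List.getElem?_eq_getElem (by omega)]
      have hmono : s[s.length - 2]'(by omega) ≤ s[s.length - 1]'(by omega) := by
        have := PySem.List.sorted_id_getElem_mono cs (p := s.length - 2) (q := s.length - 1)
          (by omega) (by rw [← hsdef]; omega)
        simpa [← hsdef] using this
      have hacs : s[s.length - 1]'(by omega) ∈ cs := hperm.mem_iff.mp (List.getElem_mem _)
      have hmaxcs : ∀ x ∈ cs, x ≤ s[s.length - 1]'(by omega) := by
        intro x hx
        rcases List.mem_iff_getElem.mp (hperm.mem_iff.mpr hx) with ⟨i, hi, rfl⟩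
        have := PySem.List.sorted_id_getElem_mono cs (p := i) (q := s.length - 1)
          (by omega) (by rw [← hsdef]; omega)
        simpa [← hsdef] using this
      have hminqs : (k, m) ∈ qs := List.mem_of_find?_eq_some hfind
      have hmincs : m ∈ cs := List.mem_map.mpr ⟨(k, m), hminqs, rfl⟩
      have hma : m = s[s.length - 1]'(by omega) := by
        refine le_antisymm (hmaxcs m hmincs) ?_
        rcases List.mem_map.mp hacs with ⟨q', hq', hq'2⟩
        rw [← hq'2]; exact hmax q' hq'
      have hdecomp : s = s.take (s.length - 1) ++ [s[s.length - 1]'(by omega)] := by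
        conv_lhs => rw [← List.take_append_drop (s.length - 1) s]
        congr 1
        rw [List.drop_eq_getElem_cons (by omega)]
        have h11 : s.length - 1 + 1 = s.length := by omega
        rw [h11, List.drop_eq_nil_iff.mpr (by omega)]
      have htakele : ∀ x ∈ s.take (s.length - 1), x ≤ s[s.length - 2]'(by omega) := by
        intro x hx
        rcases List.mem_iff_getElem.mp hx with ⟨i, hi, rfl⟩
        rw [List.getElem_take]
        have hi' : i ≤ s.length - 2 := by
          have := hi; rw [List.length_take] at this; omega
        have := PySem.List.sorted_id_getElem_mono cs (p := i) (q := s.length - 2)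
          (by omega) (by rw [← hsdef]; omega)
        simpa [← hsdef] using this
      have hcount : s.count (s[s.length - 1]'(by omega)) = cs.count (s[s.length - 1]'(by omega)) :=
        hperm.count_eq _
      unfold findOwnerOfData
      simp only [hkeys, ← hcsdef]
      have hfreq' : (qs.map Prod.fst).map
          (fun k' => (PySem.List.count ((PySem.Dict.mk md).getD k' []) cd : Int)) = cs := by
        rw [← hkeys]; exact hfreq
      simp only [hfreq', ← hsdef]
      have hne' : qs.map Prod.fst ≠ [] := by
        intro h; exact hne (List.map_eq_nil_iff.mp h)
      have hlen1 : ¬ ((qs.map Prod.fst).length = 1) := by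
        rw [List.length_map]; omega
      rw [if_pos hne', if_neg hlen1, ha, hb]
      dsimp only
      by_cases hcnt : 2 ≤ cs.count m
      · have hnlt : ¬ (s[s.length - 2]'(by omega) < s[s.length - 1]'(by omega)) := by
          intro hlt
          have hnotin : s[s.length - 1]'(by omega) ∉ s.take (s.length - 1) := by
            intro hx
            have := htakele _ hx; omega
          have hc1 : List.count (s[s.length - 1]'(by omega)) s = 1 := by
            have hceq := congrArg (List.count (s[s.length - 1]'(by omega))) hdecomp
            rw [List.count_append, List.count_eq_zero.mpr hnotin] at hceq
            simpa using hceq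
          rw [hcount] at hc1
          rw [hma] at hcnt
          omega
        rw [if_neg hnlt]
        simp [hfold, hcnt]
      · have hc1 : cs.count m = 1 := by
          have : 0 < cs.count m := List.count_pos_iff.mpr hmincs
          omega
        have hblt : s[s.length - 2]'(by omega) < s[s.length - 1]'(by omega) := by
          rcases lt_or_eq_of_le hmono with h | h
          · exact h
          · exfalso
            have hbmem : s[s.length - 1]'(by omega) ∈ s.take (s.length - 1) := by
              rw [← h]
              have hlt' : s.length - 2 < (s.take (s.length - 1)).length := by
                rw [List.length_take]; omega
              have hge : (s.take (s.length - 1))[s.length - 2]'hlt' = s[s.length - 2]'(by omega) := by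
                simp [List.getElem_take]
              exact hge ▸ List.getElem_mem _
            have hsc := congrArg (List.count (s[s.length - 1]'(by omega))) hdecomp
            rw [List.count_append] at hsc
            simp at hsc
            have h1c : 0 < (s.take (s.length - 1)).count (s[s.length - 1]'(by omega)) :=
              List.count_pos_iff.mpr hbmem
            rw [hma] at hcnt
            omega
        rw [if_pos hblt]
        obtain ⟨i, hidx⟩ : ∃ i, PySem.List.index? cs (s[s.length - 1]'(by omega)) = some i := by
          cases hix : PySem.List.index? cs (s[s.length - 1]'(by omega)) with
          | none => rw [PySem.List.index?_eq_none_iff] at hix; exact absurd hacs hix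
          | some i => exact ⟨i, rfl⟩
        rw [hidx]
        dsimp only
        obtain ⟨pre, suf, hsplit, hprelen, hprenot⟩ := (PySem.List.index?_eq_some_iff cs _ i).mp hidx
        have hms : List.map Prod.snd qs = pre ++ s[s.length - 1]'(by omega) :: suf := by
          rw [← hcsdef]; exact hsplit
        obtain ⟨qs₁, qs₂, hqsapp, hmap1, hmap2⟩ := List.map_eq_append_iff.mp hms
        obtain ⟨q0, qs₂', hq2eq, hq0a, hmap2'⟩ := List.map_eq_cons_iff.mp hmap2
        have hfq1 : List.find? (fun q => q.2 == m) qs₁ = none := by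
          refine List.find?_eq_none.mpr ?_
          intro x hx
          have hxp : x.2 ∈ pre := by rw [← hmap1]; exact List.mem_map_of_mem hx
          simp only [beq_iff_eq]
          intro hxm
          exact hprenot (hma ▸ hxm ▸ hxp)
        have hq0m : q0 = (k, m) := by
          have hsome : List.find? (fun q => q.2 == m) qs = some q0 := by
            rw [hqsapp, hq2eq, List.find?_append, hfq1]
            simp [List.find?, hq0a, ← hma]
          rw [hfind] at hsome
          exact (Option.some.inj hsome).symm
        have hkeyssplit : List.map Prod.fst qs = List.map Prod.fst qs₁ ++ q0.1 :: List.map Prod.fst qs₂' := by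
          rw [hqsapp, hq2eq]; simp
        have hieq : (i : Int) = ((List.map Prod.fst qs₁).length : Int) := by
          have hp1 : pre.length = qs₁.length := by rw [← hmap1]; simp
          rw [List.length_map]
          omega
        rw [hkeyssplit, hieq, PySem.List.pyGet?_append_length, hq0m]
        have hnm : ¬ m < 0 := by omega
        simp [hfold, hc1, hnm]

-- ===== VERDICT (by name: the statement is the Claim_ definition above) =====
theorem findOwnerOfData_spec : Claim_equal_findOwnerOfData := by
  intro cd md _ hpre
  unfold Pre_findOwnerOfData at hpre
  unfold Spec_findOwnerOfData
  exact pv_main cd md hpre
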